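-- pv_equiv track=rewrite | github.com/batamorphism/Coding | Python/AtCoder/old/typical90_bk_1206.py | cnt_same_col
-- ===== SOURCE A (Python) =====
-- def cnt_same_col(grid):
--     # 縦が全部同じ数だったら+1する
--     ret = 0
--     ret_of = {}
--     ret_of[0] = 0
--     # 転置する
--     grid = list(zip(*grid))
--     # 行が全部同じだったら、その数に+1する
--     r_end = len(grid)
--     c_end = len(grid[0])
--     for r in range(r_end):
--         row = grid[r]
--         if len(set(row)) == 1:
--             ret_of[row[0]] = ret_of.get(row[0], 0) + c_end
--     ret_of_list = list(ret_of.values())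
--     ret = max(ret_of_list)
--     return ret
-- ===== SOURCE B (Python) =====
-- def cnt_same_col(grid):
--     # 縦が全部同じ数だったら+1する — survivor-set algorithm: stream the rows once,
--     # keeping a dict of still-uniform columns (column -> candidate value), then
--     # count the most frequent surviving value and multiply by the row count.
--     alive = dict(enumerate(grid[0]))
--     for row in grid[1:]:
--         alive = {c: v for c, v in alive.items() if c < len(row) and row[c] == v}
--     vals = list(alive.values())
--     return max((vals.count(v) for v in set(vals)), default=0) * len(grid)
-- ===== Notes on version B (the rewrite author's own statement) =====
-- stated objective: alternative
-- what changed: B never builds the transpose or scans columns: it streams the rows once through a shrinking survivor dict (column index -> candidate value), dropping a column the first time a row disagrees, then takes the most frequent surviving value by counting and multiplies by the row count once at the end, instead of A's per-column set() uniformity test with a running {0:0}-seeded accumulation of c_end.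
import Mathlib
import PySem

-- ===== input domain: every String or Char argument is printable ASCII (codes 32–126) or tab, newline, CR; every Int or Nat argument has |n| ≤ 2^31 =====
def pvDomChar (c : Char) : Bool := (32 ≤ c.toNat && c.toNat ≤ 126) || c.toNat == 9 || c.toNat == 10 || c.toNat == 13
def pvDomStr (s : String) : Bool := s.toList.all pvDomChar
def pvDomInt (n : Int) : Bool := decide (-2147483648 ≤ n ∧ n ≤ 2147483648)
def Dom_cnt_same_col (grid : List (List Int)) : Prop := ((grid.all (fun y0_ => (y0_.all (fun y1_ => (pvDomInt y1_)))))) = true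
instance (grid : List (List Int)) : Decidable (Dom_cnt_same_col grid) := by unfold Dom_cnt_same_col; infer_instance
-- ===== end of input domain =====

-- B replaces A's transpose-and-scan-columns algorithm by a survivor-set stream over the rows
-- (a dict of still-uniform columns shrunk row by row), then one count-based max (objective: alternative;
-- a timing run measured it faster by a constant factor).

-- ===== PORT A =====
-- hand port of Python `list(zip(*grid))`: the columns, truncated to the shortest row (exact for zip;
-- the index c is always in range for every row, so the `getD` default 0 is never used)
def pyZipStar (grid : List (List Int)) : List (List Int) :=
  (List.range (((grid.map List.length).min?).getD 0)).map
    (fun c => grid.map (fun row => row.getD c 0))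

-- loop body of A: `if len(set(row)) == 1: ret_of[row[0]] = ret_of.get(row[0], 0) + c_end`
def stepA (g : List (List Int)) (c_end : Int) (d : PySem.Dict Int Int) (r : Nat) :
    PySem.Dict Int Int :=
  let row := g.getD r []
  if (PySem.Set.ofList row).length = 1 then
    d.insert (row.getD 0 0) (d.getD (row.getD 0 0) 0 + c_end)
  else d

def cnt_same_col (grid : List (List Int)) : Int :=
  let ret_of0 : PySem.Dict Int Int := (PySem.Dict.mk []).insert 0 0
  let g := pyZipStar grid
  let r_end := g.length
  let c_end : Int := ((g.getD 0 []).length : Int)   -- len(grid[0]); Pre_ excludes the IndexError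
  let ret_of := (List.range r_end).foldl (stepA g c_end) ret_of0
  (PySem.List.max? ret_of.values id).getD 0          -- ret_of always holds key 0, so never empty

-- ===== PORT B =====
-- the comprehension's condition `c < len(row) and row[c] == v` on an item p = (c, v)
def rowOK (row : List Int) (p : Int × Int) : Bool :=
  decide (p.1 < (row.length : Int)) && (PySem.List.pyGetD row p.1 0 == p.2)

-- loop body of B: `alive = {c: v for c, v in alive.items() if c < len(row) and row[c] == v}`
-- (the comprehension's keys are pairwise distinct, being a sublist of alive's keys, so Dict.mk is exact)
def stepRow (d : PySem.Dict Int Int) (row : List Int) : PySem.Dict Int Int :=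
  PySem.Dict.mk (d.items.filter (rowOK row))

def cnt_same_col_alt (grid : List (List Int)) : Int :=
  let alive0 : PySem.Dict Int Int := PySem.Dict.mk (PySem.List.enumerate (grid.headD []) 0)
    -- dict(enumerate(grid[0])): keys 0,1,2,… are distinct, so Dict.mk is exact; Pre_ excludes grid = []
  let alive := (grid.drop 1).foldl stepRow alive0
  let vals := alive.values
  (PySem.List.maxD ((PySem.Set.ofList vals).map (fun v => (vals.count v : Int))) id 0)
    * (grid.length : Int)

-- ===== PRECONDITION & SPEC =====
-- Pre_: Python A raises IndexError on the empty grid and on any grid with an empty row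
-- (the transpose is empty, so grid[0] fails); exactly those inputs are excluded.
def Pre_cnt_same_col (grid : List (List Int)) : Prop :=
  grid ≠ [] ∧ ∀ row ∈ grid, row ≠ []
instance (grid : List (List Int)) : Decidable (Pre_cnt_same_col grid) := by
  unfold Pre_cnt_same_col; infer_instance

def pvWitness_cnt_same_col : List (List Int) := [[1, 2], [1, 3]]

def Spec_cnt_same_col (grid : List (List Int)) (out : Int) : Prop := out = cnt_same_col_alt grid
instance (grid : List (List Int)) (out : Int) : Decidable (Spec_cnt_same_col grid out) := by unfold Spec_cnt_same_col; infer_instance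

-- ===== CLAIM (what is proved, stated in full; the proofs are below) =====
def Claim_equal_cnt_same_col : Prop := ∀ (grid : List (List Int)), Dom_cnt_same_col grid → Pre_cnt_same_col grid → Spec_cnt_same_col grid (cnt_same_col grid)

-- ===== LEMMAS AND PROOFS =====
-- (everything below proves Claim_equal; nothing below is referenced by the claims)

-- the invariant linking A's dict (seeded with {0:0}, accumulating c per hit) to a plain counter
def DictInv (c : Int) (dA dB : PySem.Dict Int Int) : Prop :=
  dA.keys = 0 :: dB.keys.filter (fun k => k ≠ 0)
  ∧ (∀ k : Int, dA.getD k 0 = c * dB.getD k 0)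
  ∧ dB.keys.Nodup
  ∧ (∀ k ∈ dB.keys, 1 ≤ dB.getD k 0)

lemma dict_contains_iff (d : PySem.Dict Int Int) (k : Int) :
    d.contains k = true ↔ k ∈ d.keys := by
  simp only [PySem.Dict.contains, PySem.Dict.keys, List.any_eq_true, List.mem_map,
    beq_iff_eq]

lemma getD_not_mem (d : PySem.Dict Int Int) (k : Int) (d0 : Int) (h : k ∉ d.keys) :
    d.getD k d0 = d0 := by
  have : d.get? k = none := by
    simp only [PySem.Dict.get?, Option.map_eq_none_iff, List.find?_eq_none]
    intro p hp
    simp only [beq_iff_eq]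
    intro hpk
    apply h
    rw [← hpk]
    exact List.mem_map_of_mem hp
  simp [PySem.Dict.getD, this]

lemma keys_insert_mem (d : PySem.Dict Int Int) (k : Int) (v : Int) (h : k ∈ d.keys) :
    (d.insert k v).keys = d.keys := by
  have hc : d.contains k = true := (dict_contains_iff d k).mpr h
  simp only [PySem.Dict.keys, PySem.Dict.items_insert, hc, if_true, List.map_map]
  apply List.map_congr_left
  intro p _
  by_cases hp : p.1 = k
  · simp [hp]
  · simp [hp]

lemma keys_insert_not_mem (d : PySem.Dict Int Int) (k : Int) (v : Int) (h : k ∉ d.keys) :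
    (d.insert k v).keys = d.keys ++ [k] := by
  have hc : ¬ d.contains k = true := by rw [dict_contains_iff]; exact h
  simp [PySem.Dict.keys, PySem.Dict.items_insert, hc]

lemma inv_insert (c : Int) (dA dB : PySem.Dict Int Int) (v : Int) (h : DictInv c dA dB) :
    DictInv c (dA.insert v (dA.getD v 0 + c)) (dB.insert v (dB.getD v 0 + 1)) := by
  obtain ⟨hk, hg, hnd, hpos⟩ := h
  have hgetD : ∀ k : Int, (dA.insert v (dA.getD v 0 + c)).getD k 0 =
      c * (dB.insert v (dB.getD v 0 + 1)).getD k 0 := by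
    intro k
    rw [PySem.Dict.getD_insert, PySem.Dict.getD_insert]
    split_ifs with hkv
    · rw [hg v]; ring
    · exact hg k
  by_cases hv : v ∈ dB.keys
  · have hvA : v ∈ dA.keys := by
      rw [hk]
      by_cases h0 : v = 0
      · simp [h0]
      · exact List.mem_cons_of_mem _ (List.mem_filter.mpr ⟨hv, by simp [h0]⟩)
    refine ⟨?_, hgetD, ?_, ?_⟩
    · rw [keys_insert_mem _ _ _ hvA, keys_insert_mem _ _ _ hv]; exact hk
    · rw [keys_insert_mem _ _ _ hv]; exact hnd
    · intro k hk'
      rw [keys_insert_mem _ _ _ hv] at hk'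
      rw [PySem.Dict.getD_insert]
      split_ifs with hkv
      · have := hpos v hv; omega
      · exact hpos k hk'
  · by_cases h0 : v = 0
    · subst h0
      have hvA : (0 : Int) ∈ dA.keys := by rw [hk]; simp
      refine ⟨?_, hgetD, ?_, ?_⟩
      · rw [keys_insert_mem _ _ _ hvA, keys_insert_not_mem _ _ _ hv, hk,
          List.filter_append]
        simp
      · rw [keys_insert_not_mem _ _ _ hv]
        simp [List.nodup_append]
        exact ⟨hnd, fun a ha h0 => hv (h0 ▸ ha)⟩
      · intro k hk'
        rw [keys_insert_not_mem _ _ _ hv] at hk'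
        rw [PySem.Dict.getD_insert]
        split_ifs with hkv
        · rw [getD_not_mem _ _ _ hv]; omega
        · rcases List.mem_append.mp hk' with h1 | h1
          · exact hpos k h1
          · simp at h1; exact absurd h1 hkv
    · have hvA : v ∉ dA.keys := by
        rw [hk]
        simp only [List.mem_cons, List.mem_filter, not_or, not_and]
        exact ⟨h0, fun h1 => absurd h1 hv⟩
      refine ⟨?_, hgetD, ?_, ?_⟩
      · rw [keys_insert_not_mem _ _ _ hvA, keys_insert_not_mem _ _ _ hv, hk,
          List.filter_append]
        simp [h0]
      · rw [keys_insert_not_mem _ _ _ hv]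
        simp [List.nodup_append]
        exact ⟨hnd, fun a ha hav => hv (hav ▸ ha)⟩
      · intro k hk'
        rw [keys_insert_not_mem _ _ _ hv] at hk'
        rw [PySem.Dict.getD_insert]
        split_ifs with hkv
        · rw [getD_not_mem _ _ _ hv]; omega
        · rcases List.mem_append.mp hk' with h1 | h1
          · exact hpos k h1
          · simp at h1; exact absurd h1 hkv

-- len(set(x::xs)) == 1  ↔  every element equals the head
lemma set_len_one_iff (x : Int) (xs : List Int) :
    (PySem.Set.ofList (x :: xs)).length = 1 ↔ ∀ y ∈ xs, y = x := by
  constructor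
  · intro h y hy
    have hx : x ∈ PySem.Set.ofList (x :: xs) := (PySem.Set.mem_ofList _ _).mpr (by simp)
    have hyy : y ∈ PySem.Set.ofList (x :: xs) := (PySem.Set.mem_ofList _ _).mpr (by simp [hy])
    match hs : PySem.Set.ofList (x :: xs) with
    | [] => rw [hs] at hx; simp at hx
    | [a] =>
      rw [hs] at hx hyy; simp at hx hyy; omega
    | a :: b :: rest => rw [hs] at h; simp at h
  · intro h
    have step : ∀ (ys : List Int), (∀ y ∈ ys, y = x) →
        List.foldl PySem.Set.add [x] ys = [x] := by
      intro ys
      induction ys with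
      | nil => intro _; rfl
      | cons z zs ih =>
        intro hz
        have hzx : z = x := hz z (by simp)
        have : PySem.Set.add [x] z = [x] := by
          simp [PySem.Set.add, hzx, List.contains_eq_mem]
        rw [List.foldl_cons, this]
        exact ih (fun y hy => hz y (by simp [hy]))
    have h0 : PySem.Set.ofList (x :: xs) = List.foldl PySem.Set.add [x] xs := by
      simp [PySem.Set.ofList, PySem.Set.empty, PySem.Set.add, List.foldl_cons]
    rw [h0, step xs h]
    rfl

-- the r-th row of the transpose is the r-th column
lemma zip_getD (grid : List (List Int)) (r : Nat)
    (hr : r < ((grid.map List.length).min?).getD 0) :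
    (pyZipStar grid).getD r [] = grid.map (fun row => row.getD r 0) := by
  unfold pyZipStar
  rw [List.getD_eq_getElem?_getD, List.getElem?_map, List.getElem?_range hr]
  rfl


-- ===== bridging both programs to a common list of uniform-column values =====

-- A's accumulation step, as a fold over the picked values
def insStep (c : Int) (d : PySem.Dict Int Int) (v : Int) : PySem.Dict Int Int :=
  d.insert v (d.getD v 0 + c)

-- A's loop touches the dict only on uniform columns: the fold over the range is the fold of
-- insStep over the filtered value list
lemma foldl_stepA_eq (g : List (List Int)) (c : Int) (L : List Nat) (d : PySem.Dict Int Int) :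
    L.foldl (stepA g c) d =
      (L.filterMap (fun r => if (PySem.Set.ofList (g.getD r [])).length = 1
        then some ((g.getD r []).getD 0 0) else none)).foldl (insStep c) d := by
  induction L generalizing d with
  | nil => rfl
  | cons r L' ih =>
    simp only [List.foldl_cons, List.filterMap_cons]
    by_cases hc : (PySem.Set.ofList (g.getD r [])).length = 1
    · rw [if_pos hc, List.foldl_cons, ih]
      congr 1
      simp only [stepA, insStep, List.getD_eq_getElem?_getD]
      rw [if_pos (by simpa [List.getD_eq_getElem?_getD] using hc)]
    · rw [if_neg hc, ih]
      congr 1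
      simp only [stepA, List.getD_eq_getElem?_getD]
      rw [if_neg (by simpa [List.getD_eq_getElem?_getD] using hc)]

-- the two insStep folds stay linked by DictInv
lemma fold_inv_list (c : Int) (L : List Int) (dA dB : PySem.Dict Int Int)
    (h : DictInv c dA dB) :
    DictInv c (L.foldl (insStep c) dA) (L.foldl (insStep 1) dB) := by
  induction L generalizing dA dB with
  | nil => exact h
  | cons v L' ih => exact ih _ _ (inv_insert c dA dB v h)

-- the +1 fold is Counter
lemma fold_ins1_eq_counter (L : List Int) :
    L.foldl (insStep 1) (PySem.Dict.mk []) = PySem.Dict.counter L := by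
  rw [PySem.Dict.counter_eq_foldl]
  rfl

-- B's row loop only ever filters the item list: it computes one filter by the conjunction
lemma foldl_stepRow (t : List (List Int)) (l : List (Int × Int)) :
    t.foldl stepRow (PySem.Dict.mk l) =
      PySem.Dict.mk (l.filter (fun p => t.all (fun row => rowOK row p))) := by
  induction t generalizing l with
  | nil => simp
  | cons r t' ih =>
    simp only [List.foldl_cons]
    have h1 : stepRow (PySem.Dict.mk l) r = PySem.Dict.mk (l.filter (rowOK r)) := rfl
    rw [h1, ih, List.filter_filter]
    congr 1
    apply List.filter_congr
    intro p _
    simp only [List.all_cons]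
    rw [Bool.and_comm]

-- `[v for (c, v) in enumerate(hl, s) if Q(c, v)]` as a filterMap over the index range
lemma enum_filter_map (hl : List Int) (s : Int) (Q : Int × Int → Bool) :
    ((PySem.List.enumerate hl s).filter Q).map (fun p => p.2)
      = (List.range hl.length).filterMap
          (fun (c : Nat) => if Q (s + (c : Int), hl.getD c 0) then some (hl.getD c 0) else none) := by
  induction hl generalizing s with
  | nil => rfl
  | cons x xs ih =>
    rw [PySem.List.enumerate_cons]
    have hr : List.range (x :: xs).length = 0 :: (List.range xs.length).map (· + 1) := by
      simpa using List.range_succ_eq_map (n := xs.length)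
    rw [hr, List.filterMap_cons, List.filterMap_map]
    have htail : (List.filterMap
        ((fun (c : Nat) => if Q (s + (c : Int), (x :: xs).getD c 0) then some ((x :: xs).getD c 0) else none)
          ∘ (· + 1)) (List.range xs.length))
        = (List.range xs.length).filterMap
            (fun (c : Nat) => if Q ((s + 1) + (c : Int), xs.getD c 0) then some (xs.getD c 0) else none) := by
      apply List.filterMap_congr
      intro c _
      simp only [Function.comp]
      have : s + ((c + 1 : Nat) : Int) = (s + 1) + (c : Int) := by push_cast; ring
      rw [List.getD_cons_succ, this]
    rw [htail, ← ih (s + 1)]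
    by_cases hq : Q (s, x)
    · simp [hq]
    · simp [hq]

-- the final step: from the dict invariant to the two returned values
lemma result_of_inv (c : Int) (hc : 0 ≤ c) (dA dB : PySem.Dict Int Int) (hInv : DictInv c dA dB) :
    (PySem.List.max? dA.values id).getD 0 = (PySem.List.maxD dB.values id 0) * c := by
  obtain ⟨hk, hg, hnd, hpos⟩ := hInv
  have hndA : dA.keys.Nodup := by
    rw [hk, List.nodup_cons]
    refine ⟨fun hmem => ?_, hnd.filter _⟩
    have := (List.mem_filter.mp hmem).2
    simp at this
  have hvalsA : dA.values = dA.keys.map (fun k => dA.getD k 0) :=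
    PySem.Dict.values_eq_map_keys dA hndA 0
  have hvalsB : dB.values = dB.keys.map (fun k => dB.getD k 0) :=
    PySem.Dict.values_eq_map_keys dB hnd 0
  have some_max : ∀ (y : Int) (ys : List Int), ∃ m, PySem.List.max? (y :: ys) id = some m := by
    intro y ys
    rcases hm : PySem.List.max? (y :: ys) id with _ | m
    · rw [PySem.List.max?_eq_none_iff] at hm; simp at hm
    · exact ⟨m, rfl⟩
  set M : Int := PySem.List.maxD dB.values id 0 with hM
  have hMub : ∀ k ∈ dB.keys, dB.getD k 0 ≤ M := by
    intro k hk'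
    have hmem : dB.getD k 0 ∈ dB.values := by
      rw [hvalsB]; exact List.mem_map_of_mem hk'
    rcases hvB : dB.values with _ | ⟨y, ys⟩
    · rw [hvB] at hmem; simp at hmem
    · obtain ⟨m, hm⟩ := some_max y ys
      have : M = m := by rw [hM, PySem.List.maxD, hvB, hm]; rfl
      rw [this]
      exact PySem.List.max?_isMax hm _ (hvB ▸ hmem)
  have hM0 : 0 ≤ M := by
    rcases hkB : dB.keys with _ | ⟨k0, ks⟩
    · have : dB.values = [] := by rw [hvalsB, hkB]; rfl
      rw [hM, PySem.List.maxD, this]; rfl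
    · have h1 : 1 ≤ dB.getD k0 0 := hpos k0 (by rw [hkB]; simp)
      have h2 := hMub k0 (by rw [hkB]; simp)
      omega
  have hMmem : M = 0 ∨ ∃ k ∈ dB.keys, dB.getD k 0 = M := by
    rcases hvB : dB.values with _ | ⟨y, ys⟩
    · left; rw [hM, PySem.List.maxD, hvB]; rfl
    · right
      obtain ⟨m, hm⟩ := some_max y ys
      have hMm : M = m := by rw [hM, PySem.List.maxD, hvB, hm]; rfl
      have : m ∈ dB.values := hvB ▸ PySem.List.max?_mem hm
      rw [hvalsB] at this
      obtain ⟨k, hk', hkm⟩ := List.mem_map.mp this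
      exact ⟨k, hk', by rw [hkm, hMm]⟩
  have hvalsA' : dA.values =
      (0 :: dB.keys.filter (fun k => k ≠ 0)).map (fun k => c * dB.getD k 0) := by
    rw [hvalsA, hk]
    exact List.map_congr_left (fun k _ => hg k)
  have hub : ∀ y ∈ dA.values, y ≤ c * M := by
    intro y hy
    rw [hvalsA'] at hy
    obtain ⟨k, hk', hky⟩ := List.mem_map.mp hy
    have hkM : dB.getD k 0 ≤ M := by
      rcases List.mem_cons.mp hk' with h1 | h1
      · subst h1
        by_cases h0 : (0 : Int) ∈ dB.keys
        · exact hMub 0 h0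
        · rw [getD_not_mem _ _ _ h0]; exact hM0
      · exact hMub k (List.mem_filter.mp h1).1
    rw [← hky]
    exact mul_le_mul_of_nonneg_left hkM hc
  have hmem : c * M ∈ dA.values := by
    rw [hvalsA']
    rcases hMmem with h1 | ⟨k, hk', hkM⟩
    · have h0 : (0 : Int) ∉ dB.keys := by
        intro hmem0
        have := hpos 0 hmem0
        have := hMub 0 hmem0
        omega
      have : c * dB.getD 0 0 = c * M := by rw [getD_not_mem _ _ _ h0, h1]
      exact this ▸ List.mem_map_of_mem (List.mem_cons_self)
    · by_cases h0 : k = 0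
      · subst h0
        have : c * dB.getD 0 0 = c * M := by rw [hkM]
        exact this ▸ List.mem_map_of_mem (List.mem_cons_self)
      · have : k ∈ 0 :: dB.keys.filter (fun k => k ≠ 0) :=
          List.mem_cons_of_mem _ (List.mem_filter.mpr ⟨hk', by simp [h0]⟩)
        exact hkM ▸ List.mem_map_of_mem this
  rcases hvA : dA.values with _ | ⟨y, ys⟩
  · rw [hvA] at hmem; simp at hmem
  · obtain ⟨m, hm⟩ := some_max y ys
    rw [hm]
    have h1 : m ≤ c * M := hub m (hvA ▸ PySem.List.max?_mem hm)
    have h2 : c * M ≤ m := PySem.List.max?_isMax hm _ (hvA ▸ hmem)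
    have : m = c * M := le_antisymm h1 h2
    simp [this, mul_comm]

-- B's survivor values are exactly A's uniform-column values, in the same (column) order
lemma LB_eq_LA (h : List Int) (t : List (List Int)) (m : Nat)
    (hminD : ((((h :: t).map List.length).min?).getD 0) = m)
    (hmle : ∀ row ∈ (h :: t), m ≤ row.length)
    (hattain : ∃ row ∈ (h :: t), row.length = m) :
    (List.range h.length).filterMap
      (fun (c : Nat) => if t.all (fun row => rowOK row ((c : Int), h.getD c 0))
        then some (h.getD c 0) else none)
    = (List.range m).filterMap
      (fun r => if (PySem.Set.ofList ((pyZipStar (h :: t)).getD r [])).length = 1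
        then some (((pyZipStar (h :: t)).getD r []).getD 0 0) else none) := by
  have hmh : m ≤ h.length := hmle h (by simp)
  rw [show h.length = m + (h.length - m) by omega, List.range_add, List.filterMap_append,
    List.filterMap_map]
  have htail : (List.filterMap
      ((fun (c : Nat) => if t.all (fun row => rowOK row ((c : Int), h.getD c 0))
        then some (h.getD c 0) else none) ∘ (fun x => m + x))
      (List.range (h.length - m))) = [] := by
    rw [List.filterMap_eq_nil_iff]
    intro c hc
    have hcm : m < h.length := by
      have := List.mem_range.mp hc; omega
    simp only [Function.comp]
    rw [if_neg]
    intro hall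
    obtain ⟨row, hrowmem, hrowlen⟩ := hattain
    have hrowt : row ∈ t := by
      rcases List.mem_cons.mp hrowmem with h1 | h1
      · rw [h1] at hrowlen; omega
      · exact h1
    have hfail := List.all_eq_true.mp hall row hrowt
    unfold rowOK at hfail
    simp only [Bool.and_eq_true, decide_eq_true_eq] at hfail
    have := hfail.1
    rw [hrowlen] at this
    push_cast at this
    omega
  rw [htail, List.append_nil]
  apply List.filterMap_congr
  intro c hc
  have hcm : c < m := List.mem_range.mp hc
  rw [zip_getD _ c (by rw [hminD]; exact hcm)]
  rw [List.map_cons, List.getD_cons_zero]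
  have hiff : ((PySem.Set.ofList (h.getD c 0 :: t.map (fun row => row.getD c 0))).length = 1)
      ↔ (t.all (fun row => rowOK row ((c : Int), h.getD c 0)) = true) := by
    rw [set_len_one_iff, List.all_eq_true]
    constructor
    · intro hall row hrow
      unfold rowOK
      simp only [Bool.and_eq_true, decide_eq_true_eq, beq_iff_eq]
      have hlen : c < row.length := lt_of_lt_of_le hcm (hmle row (List.mem_cons_of_mem _ hrow))
      refine ⟨by exact_mod_cast hlen, ?_⟩
      rw [PySem.List.pyGetD_natCast]
      exact hall _ (List.mem_map_of_mem hrow)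
    · intro hall y hy
      obtain ⟨row, hrow, hry⟩ := List.mem_map.mp hy
      have := hall row hrow
      unfold rowOK at this
      simp only [Bool.and_eq_true, decide_eq_true_eq, beq_iff_eq] at this
      rw [PySem.List.pyGetD_natCast] at this
      rw [← hry]
      exact this.2
  by_cases hcnd : t.all (fun row => rowOK row ((c : Int), h.getD c 0)) = true
  · rw [if_pos hcnd, if_pos (hiff.mpr hcnd)]
  · rw [if_neg hcnd, if_neg (fun hx => hcnd (hiff.mp hx))]

theorem cnt_same_col_spec : Claim_equal_cnt_same_col := by
  intro grid _ hPre
  obtain ⟨hne, hrows⟩ := hPre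
  unfold Spec_cnt_same_col
  rcases grid with _ | ⟨h, t⟩
  · exact absurd rfl hne
  -- the minimum row length m is positive
  obtain ⟨m, hm⟩ : ∃ m, (((h :: t).map List.length).min?) = some m := by
    rcases hq : (((h :: t).map List.length).min?) with _ | m
    · rw [List.min?_eq_none_iff] at hq; simp at hq
    · exact ⟨m, rfl⟩
  have hminD : ((((h :: t).map List.length).min?).getD 0) = m := by rw [hm]; rfl
  have hm' := hm
  rw [List.min?_eq_some_iff] at hm'
  obtain ⟨hmemlen, hminle⟩ := hm'
  obtain ⟨row0, hrow0mem, hrow0len⟩ := List.mem_map.mp hmemlen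
  have hmpos : 0 < m := by
    have := hrows row0 hrow0mem
    rcases row0 with _ | ⟨x, xs⟩
    · exact absurd rfl this
    · simp at hrow0len; omega
  have hmle : ∀ row ∈ (h :: t), m ≤ row.length := by
    intro row hrow
    exact hminle _ (List.mem_map_of_mem hrow)
  -- A's c_end is the number of rows, and its r_end is m
  have hcend : ((((pyZipStar (h :: t)).getD 0 []).length : Nat) : Int) = ((h :: t).length : Int) := by
    rw [zip_getD _ 0 (by rw [hminD]; exact hmpos)]
    simp
  have hrend : (pyZipStar (h :: t)).length = m := by
    unfold pyZipStar; rw [hminD]; simp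
  -- the common list of uniform-column values
  set LA : List Int := (List.range m).filterMap
      (fun r => if (PySem.Set.ofList ((pyZipStar (h :: t)).getD r [])).length = 1
        then some (((pyZipStar (h :: t)).getD r []).getD 0 0) else none) with hLA
  set LB : List Int := (List.range h.length).filterMap
      (fun (c : Nat) => if t.all (fun row => rowOK row ((c : Int), h.getD c 0))
        then some (h.getD c 0) else none) with hLB
  -- ===== A's side =====
  have hInv0 : DictInv ((h :: t).length : Int)
      ((PySem.Dict.mk []).insert 0 0) (PySem.Dict.mk []) := by
    refine ⟨?_, ?_, ?_, ?_⟩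
    · simp [PySem.Dict.insert, PySem.Dict.contains, PySem.Dict.keys]
    · intro k
      by_cases hk : k = 0
      · subst hk
        simp [PySem.Dict.getD, PySem.Dict.get?, PySem.Dict.insert, PySem.Dict.contains,
          List.find?]
      · have h1 : k ∉ ((PySem.Dict.mk []).insert 0 0 : PySem.Dict Int Int).keys := by
          simp [PySem.Dict.insert, PySem.Dict.contains, PySem.Dict.keys, hk]
        have h2 : k ∉ (PySem.Dict.mk [] : PySem.Dict Int Int).keys := by
          simp [PySem.Dict.keys]
        rw [getD_not_mem _ _ _ h1, getD_not_mem _ _ _ h2]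
        ring
    · simp [PySem.Dict.keys]
    · simp [PySem.Dict.keys]
  have hA : cnt_same_col (h :: t) =
      (PySem.List.maxD (PySem.Dict.counter LA).values id 0) * ((h :: t).length : Int) := by
    simp only [cnt_same_col]
    rw [hrend, hcend, foldl_stepA_eq, ← hLA, ← fold_ins1_eq_counter]
    exact result_of_inv _ (by positivity) _ _ (fold_inv_list _ LA _ _ hInv0)
  -- ===== B's side =====
  have hvalues_mk : ∀ l : List (Int × Int), (PySem.Dict.mk l).values = l.map (fun p => p.2) :=
    fun l => rfl
  have hB : cnt_same_col_alt (h :: t) =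
      (PySem.List.maxD ((PySem.Set.ofList LB).map (fun v => (LB.count v : Int))) id 0)
        * ((h :: t).length : Int) := by
    simp only [cnt_same_col_alt, List.headD_cons, List.drop_succ_cons, List.drop_zero]
    rw [foldl_stepRow, hvalues_mk,
      enum_filter_map h 0 (fun p => t.all (fun row => rowOK row p))]
    simp only [zero_add, hLB]
  rw [hA, hB]
  have hvals : (PySem.Dict.counter LA).values = (PySem.Set.ofList LA).map (fun v => (LA.count v : Int)) := by
    have h0 : (PySem.Dict.counter LA).values = (PySem.Dict.counter LA).items.map (fun p => p.2) := rfl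
    rw [h0, PySem.Dict.items_counter, List.map_map]
    rfl
  have hLBLA : LB = LA := by
    rw [hLB, hLA]
    exact LB_eq_LA h t m hminD hmle ⟨row0, hrow0mem, hrow0len⟩
  rw [hvals, hLBLA]
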